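-- pv_equiv track=rewrite | github.com/Iamnot0/SparksBM | Desktop/SparksBM/Agentic Framework/agents/mainAgent.py | _detectReportGeneration
-- ===== SOURCE A (Python) =====
-- from typing import Dict, Any, Optional, List
--
-- def _detectReportGeneration(message: str) -> Optional[Dict]:
--     """Detect report generation requests"""
--     messageLower = message.lower().strip()
--
--     # Check for report generation keywords
--     reportKeywords = ['generate', 'create', 'make', 'get']
--     reportTypes = ['inventory of assets', 'risk assessment', 'statement of applicability',
--                   'inventory', 'risk', 'statement', 'report']
--
--     hasReportKeyword = any(keyword in messageLower for keyword in reportKeywords)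
--     hasReportType = any(reportType in messageLower for reportType in reportTypes)
--
--     if hasReportKeyword and hasReportType:
--         # Extract report type
--         reportType = None
--         if 'inventory' in messageLower and 'asset' in messageLower:
--             reportType = 'inventory-of-assets'
--         elif 'risk' in messageLower and 'assessment' in messageLower:
--             reportType = 'risk-assessment'
--         elif 'statement' in messageLower and 'applicability' in messageLower:
--             reportType = 'statement-of-applicability'
--         elif 'inventory' in messageLower:
--             reportType = 'inventory-of-assets'
--         elif 'risk' in messageLower:
--             reportType = 'risk-assessment'
--         elif 'statement' in messageLower:
--             reportType = 'statement-of-applicability'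
--
--         if reportType:
--             return {'operation': 'generate_report', 'reportType': reportType}
--
--     return None
-- ===== SOURCE B (Python) =====
-- _TOPICS = [
--     ('inventory', 'asset', 'inventory-of-assets'),
--     ('risk', 'assessment', 'risk-assessment'),
--     ('statement', 'applicability', 'statement-of-applicability'),
-- ]
--
--
-- def _detectReportGeneration(message: str):
--     """Detect report generation requests (min-rank scoring version).
--
--     Each topic present in the message gets a priority rank: i if its refining
--     word is also present, 3 + i otherwise; the lowest-ranked topic wins.  This
--     computes exactly the priority of A's six-branch cascade."""
--     ml = message.lower().strip()
--     if not any(k in ml for k in ('generate', 'create', 'make', 'get')):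
--         return None
--     best = None  # (rank, reportType)
--     for i, (word, refine, rtype) in enumerate(_TOPICS):
--         if word in ml:
--             rank = i if refine in ml else 3 + i
--             if best is None or rank < best[0]:
--                 best = (rank, rtype)
--     if best is None:
--         return None
--     return {'operation': 'generate_report', 'reportType': best[1]}
-- ===== Notes on version B (the rewrite author's own statement) =====
-- stated objective: alternative
-- what changed: Replaces A's six-branch if/elif cascade (plus its redundant report-type gate) by a single scoring pass: each of the three topics present in the message gets a numeric priority rank (refined or not), and a running-minimum accumulator picks the winning report type.
import Mathlib
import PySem

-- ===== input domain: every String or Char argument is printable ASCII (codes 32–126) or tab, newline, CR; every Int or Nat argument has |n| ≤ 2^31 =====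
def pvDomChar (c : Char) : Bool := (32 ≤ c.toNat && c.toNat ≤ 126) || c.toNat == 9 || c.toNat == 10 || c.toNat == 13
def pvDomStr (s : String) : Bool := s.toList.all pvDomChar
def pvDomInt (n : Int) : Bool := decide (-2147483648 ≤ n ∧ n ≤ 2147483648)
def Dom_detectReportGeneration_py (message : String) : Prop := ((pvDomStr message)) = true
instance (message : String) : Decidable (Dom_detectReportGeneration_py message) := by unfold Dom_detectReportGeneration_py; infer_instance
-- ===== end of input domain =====

-- B replaces A's six-branch if/elif cascade (and its redundant report-type gate) by a
-- min-rank scoring pass over the three topics; objective: alternative decomposition.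

-- ===== PORT A =====
def detectReportGeneration_py (message : String) : Option (List (String × String)) :=
  let messageLower := PySem.Str.strip (PySem.Str.lower message)
  let reportKeywords := ["generate", "create", "make", "get"]
  let reportTypes := ["inventory of assets", "risk assessment", "statement of applicability",
                      "inventory", "risk", "statement", "report"]
  let hasReportKeyword := reportKeywords.any (fun k => PySem.Str.isIn k messageLower)
  let hasReportType := reportTypes.any (fun t => PySem.Str.isIn t messageLower)
  if hasReportKeyword && hasReportType then
    let reportType : Option String :=
      if PySem.Str.isIn "inventory" messageLower && PySem.Str.isIn "asset" messageLower then
        some "inventory-of-assets"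
      else if PySem.Str.isIn "risk" messageLower && PySem.Str.isIn "assessment" messageLower then
        some "risk-assessment"
      else if PySem.Str.isIn "statement" messageLower && PySem.Str.isIn "applicability" messageLower then
        some "statement-of-applicability"
      else if PySem.Str.isIn "inventory" messageLower then some "inventory-of-assets"
      else if PySem.Str.isIn "risk" messageLower then some "risk-assessment"
      else if PySem.Str.isIn "statement" messageLower then some "statement-of-applicability"
      else none
    match reportType with
    | some rt => some [("operation", "generate_report"), ("reportType", rt)]
    | none => none
  else none

-- ===== PORT B =====
def pvTopics : List (String × String × String) :=
  [("inventory", "asset", "inventory-of-assets"),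
   ("risk", "assessment", "risk-assessment"),
   ("statement", "applicability", "statement-of-applicability")]

-- the min-rank accumulator loop of Source B (for i, (word, refine, rtype) in enumerate(_TOPICS))
def pvBest (ml : String) : Option (Int × String) :=
  (PySem.List.enumerate pvTopics).foldl (fun best p =>
    if PySem.Str.isIn p.2.1 ml then
      let rank := if PySem.Str.isIn p.2.2.1 ml then p.1 else 3 + p.1
      match best with
      | none => some (rank, p.2.2.2)
      | some b => if rank < b.1 then some (rank, p.2.2.2) else best
    else best) none

def detectReportGeneration_py_alt (message : String) : Option (List (String × String)) :=
  let ml := PySem.Str.strip (PySem.Str.lower message)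
  if !(["generate", "create", "make", "get"].any (fun k => PySem.Str.isIn k ml)) then
    none
  else
    match pvBest ml with
    | none => none
    | some b => some [("operation", "generate_report"), ("reportType", b.2)]

-- ===== PRECONDITION & SPEC =====
def Spec_detectReportGeneration_py (message : String) (out : Option (List (String × String))) : Prop := out = detectReportGeneration_py_alt message
instance (message : String) (out : Option (List (String × String))) : Decidable (Spec_detectReportGeneration_py message out) := by unfold Spec_detectReportGeneration_py; infer_instance

-- ===== CLAIM (what is proved, stated in full; the proofs are below) =====
def Claim_equal_detectReportGeneration_py : Prop := ∀ (message : String), Dom_detectReportGeneration_py message → Spec_detectReportGeneration_py message (detectReportGeneration_py message)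

-- ===== LEMMAS AND PROOFS =====

-- A's inner extraction cascade, named so both ports can be related to it.
def pvCascade (ml : String) : Option String :=
  if PySem.Str.isIn "inventory" ml && PySem.Str.isIn "asset" ml then some "inventory-of-assets"
  else if PySem.Str.isIn "risk" ml && PySem.Str.isIn "assessment" ml then some "risk-assessment"
  else if PySem.Str.isIn "statement" ml && PySem.Str.isIn "applicability" ml then some "statement-of-applicability"
  else if PySem.Str.isIn "inventory" ml then some "inventory-of-assets"
  else if PySem.Str.isIn "risk" ml then some "risk-assessment"
  else if PySem.Str.isIn "statement" ml then some "statement-of-applicability"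
  else none

-- B's min-rank pass picks exactly the cascade's report type
theorem pvBest_eq (ml : String) : (pvBest ml).map Prod.snd = pvCascade ml := by
  cases h1 : PySem.Str.isIn "inventory" ml <;>
  cases h2 : PySem.Str.isIn "asset" ml <;>
  cases h3 : PySem.Str.isIn "risk" ml <;>
  cases h4 : PySem.Str.isIn "assessment" ml <;>
  cases h5 : PySem.Str.isIn "statement" ml <;>
  cases h6 : PySem.Str.isIn "applicability" ml <;>
    simp only [pvBest, pvTopics, PySem.List.enumerate_cons, PySem.List.enumerate_nil,
      List.foldl, pvCascade, h1, h2, h3, h4, h5, h6, Bool.and_true, Bool.and_false, if_true, Option.map_some] <;>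
    norm_num

-- a successful extraction implies A's report-type gate (so the gate B drops is redundant)
theorem pvCascade_type (ml : String) (rt : String) (h : pvCascade ml = some rt) :
    (["inventory of assets", "risk assessment", "statement of applicability",
      "inventory", "risk", "statement", "report"].any (fun t => PySem.Str.isIn t ml)) = true := by
  unfold pvCascade at h
  simp only [List.any_cons, List.any_nil, Bool.or_eq_true, Bool.or_false]
  split_ifs at h with h1 h2 h3 h4 h5 h6
  · exact Or.inr (Or.inr (Or.inr (Or.inl ((Bool.and_eq_true _ _).mp h1).1)))
  · exact Or.inr (Or.inr (Or.inr (Or.inr (Or.inl ((Bool.and_eq_true _ _).mp h2).1))))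
  · exact Or.inr (Or.inr (Or.inr (Or.inr (Or.inr (Or.inl ((Bool.and_eq_true _ _).mp h3).1)))))
  · exact Or.inr (Or.inr (Or.inr (Or.inl h4)))
  · exact Or.inr (Or.inr (Or.inr (Or.inr (Or.inl h5))))
  · exact Or.inr (Or.inr (Or.inr (Or.inr (Or.inr (Or.inl h6)))))

-- fold A's inline cascade into pvCascade (definitional)
theorem pvCascade_fold (ml : String) :
    (if PySem.Str.isIn "inventory" ml && PySem.Str.isIn "asset" ml then
       some "inventory-of-assets"
     else if PySem.Str.isIn "risk" ml && PySem.Str.isIn "assessment" ml then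
       some "risk-assessment"
     else if PySem.Str.isIn "statement" ml && PySem.Str.isIn "applicability" ml then
       some "statement-of-applicability"
     else if PySem.Str.isIn "inventory" ml then some "inventory-of-assets"
     else if PySem.Str.isIn "risk" ml then some "risk-assessment"
     else if PySem.Str.isIn "statement" ml then some "statement-of-applicability"
     else none) = pvCascade ml := rfl

-- ===== VERDICT (by name: the statement is the Claim_ definition above) =====
theorem detectReportGeneration_py_spec : Claim_equal_detectReportGeneration_py := by
  intro message _
  unfold Spec_detectReportGeneration_py
  conv_lhs => unfold detectReportGeneration_py; simp only []
  conv_rhs => unfold detectReportGeneration_py_alt; simp only []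
  rw [pvCascade_fold]
  cases hkw : (["generate", "create", "make", "get"].any
      (fun k => PySem.Str.isIn k (PySem.Str.strip (PySem.Str.lower message)))) with
  | false => rfl
  | true =>
    have hb := pvBest_eq (PySem.Str.strip (PySem.Str.lower message))
    cases hc : pvCascade (PySem.Str.strip (PySem.Str.lower message)) with
    | none =>
      rw [hc] at hb
      cases hbest : pvBest (PySem.Str.strip (PySem.Str.lower message)) with
      | none =>
        cases hht : (["inventory of assets", "risk assessment", "statement of applicability",
            "inventory", "risk", "statement", "report"].any
              (fun t => PySem.Str.isIn t (PySem.Str.strip (PySem.Str.lower message)))) with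
        | false => rfl
        | true => rfl
      | some b => rw [hbest] at hb; simp at hb
    | some rt =>
      rw [hc] at hb
      rw [pvCascade_type _ _ hc]
      cases hbest : pvBest (PySem.Str.strip (PySem.Str.lower message)) with
      | none => rw [hbest] at hb; simp at hb
      | some b =>
        rw [hbest] at hb
        simp only [Option.map_some, Option.some.injEq] at hb
        simp [hb]
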